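-- pv_equiv track=rewrite | github.com/gilesknap/peyote-pattern | peyote/patterns.py | greek_key
-- ===== SOURCE A (Python) =====
-- def greek_key(columns: int, rows: int, size: int = 4,
--               color: int = 1, bg: int = 0) -> list[list[int]]:
--     """Greek key / meander border pattern."""
--     # Build one tile of the meander
--     tile_h = size * 2
--     tile_w = size * 2
--     tile = [[bg] * tile_w for _ in range(tile_h)]
--
--     # Draw the key shape
--     for i in range(tile_w):
--         tile[0][i] = color                    # top bar
--     for i in range(tile_h):
--         tile[i][tile_w - 1] = color           # right bar
--     for i in range(tile_w - 1):
--         tile[tile_h - 1][i] = color           # bottom bar (partial)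
--     for i in range(2, tile_h):
--         tile[i][0] = color                    # left bar (partial)
--     for i in range(1, tile_w - 1):
--         tile[2][i] = color                    # inner top bar
--
--     # Tile it
--     grid = []
--     for r in range(rows):
--         row = []
--         for c in range(columns):
--             row.append(tile[r % tile_h][c % tile_w])
--         grid.append(row)
--     return grid
-- ===== SOURCE B (Python) =====
-- def greek_key(columns: int, rows: int, size: int = 4,
--               color: int = 1, bg: int = 0) -> list[list[int]]:
--     """Greek key / meander pattern built row-wise: three row prototypes,
--     each repeated and truncated to the grid width, then the n-row block
--     repeated and truncated to the grid height."""
--     n = size * 2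
--     vreps = (rows + n - 1) // n                         # tile rows needed down
--     if vreps <= 0:
--         return []
--     reps = (columns + n - 1) // n                       # tiles needed across
--     solid = ([color] * n * reps)[:columns]              # fully colored row
--     gap = (([bg] * (n - 1) + [color]) * reps)[:columns]  # row 1: only right bar
--     sides = (([color] + [bg] * (n - 2) + [color]) * reps)[:columns]  # left+right bars
--     block = [solid if i in (0, 2, n - 1) else gap if i == 1 else sides
--              for i in range(n)]
--     return (block * vreps)[:rows]
-- ===== Notes on version B (the rewrite author's own statement) =====
-- stated objective: faster
-- what changed: B drops A's cell-painted tile and per-cell modular lookup entirely: it builds each of the three distinct row prototypes once (solid, right-bar-only, two-side-bars), makes each full-width row by list repetition and truncation, and produces the grid by repeating the n-row block and truncating to the height, so per-cell work is replaced by list-level repetition.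
-- outside the precondition, e.g. on greek_key(3, -2, 0, 1, 0): A returns [], B raises ZeroDivisionError; on greek_key(-1, 2, -1, 1, 0): A returns [[], []], B returns []
import Mathlib
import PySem

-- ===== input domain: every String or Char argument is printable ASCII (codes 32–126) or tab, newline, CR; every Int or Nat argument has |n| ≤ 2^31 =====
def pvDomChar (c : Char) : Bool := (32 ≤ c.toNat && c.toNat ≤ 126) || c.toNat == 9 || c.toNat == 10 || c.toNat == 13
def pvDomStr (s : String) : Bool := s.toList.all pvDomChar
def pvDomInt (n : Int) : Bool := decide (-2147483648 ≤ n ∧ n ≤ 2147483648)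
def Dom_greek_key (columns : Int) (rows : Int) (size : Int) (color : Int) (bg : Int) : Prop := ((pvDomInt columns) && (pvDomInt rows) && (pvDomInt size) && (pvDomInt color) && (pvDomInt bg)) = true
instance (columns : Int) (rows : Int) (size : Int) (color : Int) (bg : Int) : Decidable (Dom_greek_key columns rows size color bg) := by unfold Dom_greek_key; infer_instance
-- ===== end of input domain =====

-- B replaces A's cell-painted tile + per-cell modular lookup by a row-level construction:
-- three row prototypes repeated and truncated to the width, then the n-row block repeated
-- and truncated to the height (objective: faster — a timing run measured B faster,
-- since each distinct row is built once and repeated instead of appending every cell).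

-- ===== PORT A =====
-- tile[a][b] = v.  Exact for the in-range nonnegative indices A's loops use
-- (every write below has 0 ≤ a < tile_h and 0 ≤ b < tile_w whenever its loop range is nonempty).
def pySet2 (t : List (List Int)) (a b : Nat) (v : Int) : List (List Int) :=
  t.set a ((t.getD a []).set b v)

-- the five drawing loops on the bg-filled tile; loop ranges over nonnegative ints transcribed as Nat ranges
def tileA (n : Nat) (color bg : Int) : List (List Int) :=
  let tile0 : List (List Int) := List.replicate n (List.replicate n bg)
  let t1 := (List.range n).foldl (fun t i => pySet2 t 0 i color) tile0          -- top bar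
  let t2 := (List.range n).foldl (fun t i => pySet2 t i (n - 1) color) t1       -- right bar
  let t3 := (List.range (n - 1)).foldl (fun t i => pySet2 t (n - 1) i color) t2 -- bottom bar (partial)
  let t4 := (List.range' 2 (n - 2)).foldl (fun t i => pySet2 t i 0 color) t3    -- left bar: range(2, tile_h)
  (List.range' 1 (n - 2)).foldl (fun t i => pySet2 t 2 i color) t4              -- inner top: range(1, tile_w - 1)

def greek_key (columns : Int) (rows : Int) (size : Int) (color : Int) (bg : Int) : List (List Int) :=
  -- tile_h = tile_w = size * 2
  let tile := tileA (size * 2).toNat color bg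
  -- tile[r % tile_h][c % tile_w]: a mod by the positive divisor is in range, so getD is exact under Pre_
  (PySem.List.pyRange 0 rows 1).foldl (fun g r =>
    g ++ [(PySem.List.pyRange 0 columns 1).foldl (fun row c =>
      row ++ [((tile.getD (PySem.Int.mod r (size * 2)).toNat []).getD
                 (PySem.Int.mod c (size * 2)).toNat bg)]) []]) []

-- ===== PORT B =====
def greek_key_alt (columns : Int) (rows : Int) (size : Int) (color : Int) (bg : Int) : List (List Int) :=
  let n : Int := size * 2
  let vreps : Int := PySem.Int.floordiv (rows + n - 1) n                        -- tile rows needed down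
  if vreps ≤ 0 then [] else
  let reps : Int := PySem.Int.floordiv (columns + n - 1) n                      -- tiles needed across
  let solid := PySem.List.slice (PySem.List.pyRepeat (PySem.List.pyRepeat [color] n) reps) none (some columns)
  let gap := PySem.List.slice (PySem.List.pyRepeat (PySem.List.pyRepeat [bg] (n - 1) ++ [color]) reps) none (some columns)
  let sides := PySem.List.slice (PySem.List.pyRepeat ([color] ++ PySem.List.pyRepeat [bg] (n - 2) ++ [color]) reps) none (some columns)
  let block := (PySem.List.pyRange 0 n 1).map (fun i =>
    if i = 0 ∨ i = 2 ∨ i = n - 1 then solid else if i = 1 then gap else sides)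
  PySem.List.slice (PySem.List.pyRepeat block vreps) none (some rows)

-- ===== PRECONDITION & SPEC =====
-- Pre_ admits the natural domain size ≥ 1, plus the degenerate rows ≤ 0 requests for
-- negative size (both programs return []). It excludes size = 0, where B's ceiling division
-- raises ZeroDivisionError while A raises too on any nonempty grid and returns only
-- degenerate empty grids otherwise, and size < 0 with rows > 0, where A's empty tile raises
-- IndexError for columns > 0 and yields accidental empty rows for columns ≤ 0.
def Pre_greek_key (columns : Int) (rows : Int) (size : Int) (color : Int) (bg : Int) : Prop :=
  1 ≤ size ∨ (size ≠ 0 ∧ rows ≤ 0)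
instance (columns : Int) (rows : Int) (size : Int) (color : Int) (bg : Int) : Decidable (Pre_greek_key columns rows size color bg) := by unfold Pre_greek_key; infer_instance

def pvWitness_greek_key : Int × Int × Int × Int × Int := (5, 5, 2, 1, 0)

def Spec_greek_key (columns : Int) (rows : Int) (size : Int) (color : Int) (bg : Int) (out : List (List Int)) : Prop := out = greek_key_alt columns rows size color bg
instance (columns : Int) (rows : Int) (size : Int) (color : Int) (bg : Int) (out : List (List Int)) : Decidable (Spec_greek_key columns rows size color bg out) := by unfold Spec_greek_key; infer_instance

-- ===== CLAIM (what is proved, stated in full; the proofs are below) =====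
def Claim_equal_greek_key : Prop := ∀ (columns : Int) (rows : Int) (size : Int) (color : Int) (bg : Int), Dom_greek_key columns rows size color bg → Pre_greek_key columns rows size color bg → Spec_greek_key columns rows size color bg (greek_key columns rows size color bg)

-- ===== LEMMAS AND PROOFS =====

-- the lit-cell predicate of the tile position (proof-side characterisation of both programs)
def lit_alt (n i j : Int) : Bool :=
  i == 0 || j == n - 1 || (i == n - 1 && decide (j < n - 1))
    || (j == 0 && decide (i ≥ 2)) || (i == 2 && decide (1 ≤ j) && decide (j ≤ n - 2))

-- canonical per-cell form both ports are reduced to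
def canonGrid (columns rows size color bg : Int) : List (List Int) :=
  (PySem.List.pyRange 0 rows 1).map (fun r =>
    (PySem.List.pyRange 0 columns 1).map (fun c =>
      if lit_alt (size * 2) (PySem.Int.mod r (size * 2)) (PySem.Int.mod c (size * 2)) then color else bg))

theorem lit_alt_iff (n i j : Int) :
    lit_alt n i j = true ↔
      (i = 0 ∨ j = n - 1 ∨ (i = n - 1 ∧ j < n - 1) ∨ (j = 0 ∧ 2 ≤ i) ∨ (i = 2 ∧ 1 ≤ j ∧ j ≤ n - 2)) := by
  simp only [lit_alt, Bool.or_eq_true, Bool.and_eq_true, beq_iff_eq, decide_eq_true_eq]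
  tauto

-- ---- A-side lemmas: characterise the painted tile ----

theorem length_pySet2 (t : List (List Int)) (a b : Nat) (v : Int) :
    (pySet2 t a b v).length = t.length := by simp [pySet2]

theorem rowlen_pySet2 (t : List (List Int)) (a b : Nat) (v : Int) (k : Nat) :
    ((pySet2 t a b v).getD k []).length = (t.getD k []).length := by
  unfold pySet2
  by_cases hk : k = a
  · subst hk
    by_cases h : k < t.length
    · simp [List.getD, h]
    · simp [List.getD, List.getElem?_eq_none (by omega : t.length ≤ k), List.set_eq_of_length_le (by omega : t.length ≤ k)]
  · simp [List.getD, List.getElem?_set_ne (by omega : a ≠ k)]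

theorem gd2_pySet2 (t : List (List Int)) (a b : Nat) (v d : Int) (i j : Nat)
    (hi : i < t.length) (hj : j < (t.getD i []).length) :
    ((pySet2 t a b v).getD i []).getD j d
      = if a = i ∧ b = j then v else (t.getD i []).getD j d := by
  unfold pySet2
  by_cases ha : a = i
  · subst ha
    have : (t.set a ((t.getD a []).set b v)).getD a [] = (t.getD a []).set b v := by
      simp [List.getD, hi]
    rw [this]
    by_cases hb : b = j
    · subst hb
      simp only [List.getD]
      simp only [List.getD] at hj
      rw [List.getElem?_set_self']
      simp [List.getElem?_eq_getElem hj]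
    · simp [List.getD, List.getElem?_set_ne (by omega : b ≠ j), hb]
  · simp [List.getD, List.getElem?_set_ne (by omega : a ≠ i), ha]

theorem length_foldl_pySet2 (L : List Nat) (p q : Nat → Nat) (v : Int) (t : List (List Int)) :
    (L.foldl (fun t k => pySet2 t (p k) (q k) v) t).length = t.length := by
  induction L generalizing t with
  | nil => rfl
  | cons x L ih => simp [List.foldl_cons, ih, length_pySet2]

theorem rowlen_foldl_pySet2 (L : List Nat) (p q : Nat → Nat) (v : Int) (t : List (List Int)) (k : Nat) :
    ((L.foldl (fun t k => pySet2 t (p k) (q k) v) t).getD k []).length = (t.getD k []).length := by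
  induction L generalizing t with
  | nil => rfl
  | cons x L ih => rw [List.foldl_cons, ih, rowlen_pySet2]

theorem gd2_foldl_pySet2 (L : List Nat) (p q : Nat → Nat) (v d : Int) (t : List (List Int)) (i j : Nat)
    (hi : i < t.length) (hj : j < (t.getD i []).length) :
    ((L.foldl (fun t k => pySet2 t (p k) (q k) v) t).getD i []).getD j d
      = if ∃ k ∈ L, p k = i ∧ q k = j then v
        else (t.getD i []).getD j d := by
  induction L generalizing t with
  | nil => simp
  | cons x L ih =>
    rw [List.foldl_cons, ih _ (by rw [length_pySet2]; exact hi) (by rw [rowlen_pySet2]; exact hj),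
        gd2_pySet2 t _ _ v d i j hi hj]
    by_cases hL : ∃ k ∈ L, p k = i ∧ q k = j
    · simp [hL]
    · by_cases hx : p x = i ∧ q x = j
      · simp [hL, hx]
      · simp [hL, hx]

theorem tileA_cell (n : Nat) (color bg : Int) (i j : Nat) (hi : i < n) (hj : j < n) :
    ((tileA n color bg).getD i []).getD j bg =
      if i = 0 ∨ j = n - 1 ∨ (i = n - 1 ∧ j < n - 1) ∨ (j = 0 ∧ 2 ≤ i) ∨ (i = 2 ∧ 1 ≤ j ∧ j ≤ n - 2)
      then color else bg := by
  have h1 : (∃ k ∈ List.range n, 0 = i ∧ k = j) ↔ i = 0 := by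
    simp [List.mem_range]; omega
  have h2 : (∃ k ∈ List.range n, k = i ∧ n - 1 = j) ↔ j = n - 1 := by
    simp [List.mem_range]; omega
  have h3 : (∃ k ∈ List.range (n - 1), n - 1 = i ∧ k = j) ↔ (i = n - 1 ∧ j < n - 1) := by
    simp [List.mem_range]; omega
  have h4 : (∃ k ∈ List.range' 2 (n - 2), k = i ∧ 0 = j) ↔ (j = 0 ∧ 2 ≤ i) := by
    constructor
    · rintro ⟨k, hk, rfl, rfl⟩
      rw [List.mem_range'_1] at hk
      exact ⟨rfl, hk.1⟩
    · rintro ⟨rfl, h2i⟩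
      exact ⟨i, List.mem_range'_1.mpr ⟨h2i, by omega⟩, rfl, rfl⟩
  have h5 : (∃ k ∈ List.range' 1 (n - 2), 2 = i ∧ k = j) ↔ (i = 2 ∧ 1 ≤ j ∧ j ≤ n - 2) := by
    constructor
    · rintro ⟨k, hk, rfl, rfl⟩
      rw [List.mem_range'_1] at hk
      exact ⟨rfl, hk.1, by omega⟩
    · rintro ⟨rfl, h1j, hj2⟩
      exact ⟨j, List.mem_range'_1.mpr ⟨h1j, by omega⟩, rfl, rfl⟩
  have hi0 : i < (List.replicate n (List.replicate n bg) : List (List Int)).length := by simpa using hi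
  have hrow0 : ((List.replicate n (List.replicate n bg) : List (List Int)).getD i []).length = n := by
    simp [List.getD, hi]
  unfold tileA
  rw [gd2_foldl_pySet2 _ (fun _ => 2) (fun k => k) color bg _ i j
        (by rw [length_foldl_pySet2, length_foldl_pySet2, length_foldl_pySet2, length_foldl_pySet2]; exact hi0)
        (by rw [rowlen_foldl_pySet2, rowlen_foldl_pySet2, rowlen_foldl_pySet2, rowlen_foldl_pySet2, hrow0]; exact hj),
      gd2_foldl_pySet2 _ (fun k => k) (fun _ => 0) color bg _ i j
        (by rw [length_foldl_pySet2, length_foldl_pySet2, length_foldl_pySet2]; exact hi0)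
        (by rw [rowlen_foldl_pySet2, rowlen_foldl_pySet2, rowlen_foldl_pySet2, hrow0]; exact hj),
      gd2_foldl_pySet2 _ (fun _ => n - 1) (fun k => k) color bg _ i j
        (by rw [length_foldl_pySet2, length_foldl_pySet2]; exact hi0)
        (by rw [rowlen_foldl_pySet2, rowlen_foldl_pySet2, hrow0]; exact hj),
      gd2_foldl_pySet2 _ (fun k => k) (fun _ => n - 1) color bg _ i j
        (by rw [length_foldl_pySet2]; exact hi0)
        (by rw [rowlen_foldl_pySet2, hrow0]; exact hj),
      gd2_foldl_pySet2 _ (fun _ => 0) (fun k => k) color bg _ i j hi0 (by rw [hrow0]; exact hj)]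
  have hbase : ((List.replicate n (List.replicate n bg) : List (List Int)).getD i []).getD j bg = bg := by
    simp [List.getD, hi, hj]
  rw [hbase]
  simp only [h1, h2, h3, h4, h5]
  split_ifs <;> first | rfl | omega

theorem A_eq_canon (columns rows size color bg : Int) (hs : 1 ≤ size) :
    greek_key columns rows size color bg = canonGrid columns rows size color bg := by
  unfold greek_key canonGrid
  simp only [PySem.List.foldl_append_singleton_eq_map, List.nil_append]
  apply List.map_congr_left
  intro r _
  apply List.map_congr_left
  intro c _
  have hN : (0 : Int) < size * 2 := by omega
  have hri := PySem.Int.mod_nonneg r hN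
  have hrl := PySem.Int.mod_lt r hN
  have hci := PySem.Int.mod_nonneg c hN
  have hcl := PySem.Int.mod_lt c hN
  rw [tileA_cell _ _ _ _ _ (by omega) (by omega)]
  have hcond :
      ((PySem.Int.mod r (size * 2)).toNat = 0 ∨
       (PySem.Int.mod c (size * 2)).toNat = (size * 2).toNat - 1 ∨
       ((PySem.Int.mod r (size * 2)).toNat = (size * 2).toNat - 1 ∧
         (PySem.Int.mod c (size * 2)).toNat < (size * 2).toNat - 1) ∨
       ((PySem.Int.mod c (size * 2)).toNat = 0 ∧ 2 ≤ (PySem.Int.mod r (size * 2)).toNat) ∨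
       ((PySem.Int.mod r (size * 2)).toNat = 2 ∧ 1 ≤ (PySem.Int.mod c (size * 2)).toNat ∧
         (PySem.Int.mod c (size * 2)).toNat ≤ (size * 2).toNat - 2))
      ↔ lit_alt (size * 2) (PySem.Int.mod r (size * 2)) (PySem.Int.mod c (size * 2)) = true := by
    rw [lit_alt_iff]
    omega
  simp only [hcond]

-- ---- B-side lemmas: repeat-and-truncate is per-index modular lookup ----

theorem flatten_replicate_getElem? {α : Type} (L : List α) (k j : Nat) (hj : j < k * L.length) :
    (List.replicate k L).flatten[j]? = L[j % L.length]? := by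
  induction k generalizing j with
  | zero => omega
  | succ k ih =>
    rw [List.replicate_succ, List.flatten_cons]
    by_cases h : j < L.length
    · rw [List.getElem?_append_left h, Nat.mod_eq_of_lt h]
    · have hL : 0 < L.length := by
        rcases Nat.eq_zero_or_pos L.length with h0 | h0
        · rw [h0, Nat.mul_zero] at hj; omega
        · exact h0
      rw [Nat.succ_mul] at hj
      rw [List.getElem?_append_right (Nat.le_of_not_lt h), ih (j - L.length) (by omega),
          Nat.mod_eq_sub_mod (Nat.le_of_not_lt h)]

theorem tile1D {α : Type} (L : List α) (d : α) (m n : Int)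
    (hlen : (L.length : Int) = n) (hn : 0 < n) :
    PySem.List.slice (PySem.List.pyRepeat L (PySem.Int.floordiv (m + n - 1) n)) none (some m)
      = (PySem.List.pyRange 0 m 1).map (fun x => L.getD (PySem.Int.mod x n).toNat d) := by
  subst hlen
  have hN0 : 0 < L.length := by exact_mod_cast hn
  have hrep : ∀ q : Int, PySem.List.pyRepeat L q = (List.replicate q.toNat L).flatten :=
    fun q => rfl
  by_cases hm : m ≤ 0
  · have h1 : PySem.Int.floordiv (m + L.length - 1) L.length < 1 := by
      rw [PySem.Int.floordiv_lt_iff_lt_mul hn]; omega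
    have h0 : (PySem.Int.floordiv (m + L.length - 1) L.length).toNat = 0 := by omega
    rw [hrep, h0, PySem.List.pyRange_one_eq_nil (by omega)]
    simp [PySem.List.slice]
  · have hm' : 0 < m := by omega
    set q := PySem.Int.floordiv (m + L.length - 1) (L.length : Int) with hqdef
    have hq1 : 1 ≤ q := by
      rw [hqdef, PySem.Int.le_floordiv_iff_mul_le hn]; omega
    have hmod := PySem.Int.mod_lt (m + L.length - 1) hn
    have hmodnn := PySem.Int.mod_nonneg (m + L.length - 1) hn
    have hdm := PySem.Int.floordiv_mul_add_mod (m + L.length - 1) (L.length : Int)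
    rw [← hqdef] at hdm
    set K := q.toNat with hK
    have hqK : (K : Int) = q := Int.toNat_of_nonneg (by omega)
    have hmq : m ≤ q * L.length := by
      set P := q * (L.length : Int) with hP
      omega
    have hmK : m.toNat ≤ K * L.length := by
      have hcast : ((K * L.length : Nat) : Int) = q * L.length := by push_cast [hqK]; ring
      omega
    rw [hrep, PySem.List.slice_to _ (le_of_lt hm'), PySem.List.pyRange_one]
    have hflen : (List.replicate K L).flatten.length = K * L.length := by
      simp [List.length_flatten, List.sum_replicate, smul_eq_mul, Nat.mul_comm]
    apply List.ext_getElem?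
    intro j
    by_cases hj : j < m.toNat
    · rw [List.getElem?_take_of_lt hj,
          flatten_replicate_getElem? L K j (lt_of_lt_of_le hj hmK)]
      have hjm : j < (m - 0).toNat := by omega
      simp only [List.getElem?_map, List.getElem?_range, hjm, Option.map_some]
      have : PySem.Int.mod ((0 : Int) + (j : Int)) (L.length : Int) = ((j % L.length : Nat) : Int) := by
        rw [zero_add]; exact PySem.Int.mod_natCast j L.length
      rw [this]
      simp only [Int.toNat_natCast]
      rw [List.getD_eq_getElem?_getD, List.getElem?_eq_getElem (Nat.mod_lt j hN0)]
      rfl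
    · rw [List.getElem?_eq_none (by rw [List.length_take, hflen]; omega),
          List.getElem?_eq_none (by simp only [List.length_map, List.length_range]; omega)]

theorem getD_gap (color bg : Int) (k j : Nat) (hj : j < k + 1) :
    (List.replicate k bg ++ [color]).getD j bg = if j = k then color else bg := by
  by_cases h : j < k
  · rw [List.getD_eq_getElem?_getD, List.getElem?_append_left (by simpa using h)]
    simp only [List.getElem?_replicate, h, if_true, Option.getD_some]
    rw [if_neg (by omega)]
  · have hjk : j = k := by omega
    subst hjk
    rw [List.getD_eq_getElem?_getD, List.getElem?_append_right (by simp)]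
    simp

theorem getD_sides (color bg : Int) (k j : Nat) (hj : j < k + 2) :
    (([color] ++ List.replicate k bg ++ [color]) : List Int).getD j bg
      = if j = 0 ∨ j = k + 1 then color else bg := by
  cases j with
  | zero => simp [List.getD]
  | succ j =>
    rw [show (([color] ++ List.replicate k bg ++ [color]) : List Int)
          = color :: (List.replicate k bg ++ [color]) from by simp,
        List.getD_cons_succ, getD_gap color bg k j (by omega)]
    by_cases h : j = k
    · rw [if_pos h, if_pos (by omega)]
    · rw [if_neg h, if_neg (by omega)]

set_option maxHeartbeats 1000000 in
theorem alt_eq_canon (columns rows size color bg : Int) (hs : 1 ≤ size) :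
    greek_key_alt columns rows size color bg = canonGrid columns rows size color bg := by
  have hn : (0 : Int) < size * 2 := by omega
  unfold greek_key_alt canonGrid
  dsimp only
  by_cases hv : PySem.Int.floordiv (rows + size * 2 - 1) (size * 2) ≤ 0
  case pos =>
    rw [if_pos hv]
    have hr0 : rows ≤ 0 := by
      have := (PySem.Int.floordiv_lt_iff_lt_mul hn (a := rows + size * 2 - 1) (q := 1)).mp (by omega)
      omega
    rw [PySem.List.pyRange_one_eq_nil (a := 0) (b := rows) (by omega), List.map_nil]
  case neg =>
  rw [if_neg hv]
  rw [tile1D _ ([] : List Int) rows (size * 2)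
        (by rw [List.length_map, PySem.List.length_pyRange_one]; omega) hn]
  apply List.map_congr_left
  intro r _
  have hi0 := PySem.Int.mod_nonneg r hn
  have hiN := PySem.Int.mod_lt r hn
  set i : Int := PySem.Int.mod r (size * 2) with hidef
  rw [List.getD_eq_getElem?_getD, List.getElem?_map, PySem.List.pyRange_one,
      List.getElem?_map, List.getElem?_range (by omega : i.toNat < (size * 2 - 0).toNat)]
  simp only [Option.map_some, Option.getD_some]
  rw [show (0 : Int) + (i.toNat : Int) = i by omega]
  by_cases h1 : i = 0 ∨ i = 2 ∨ i = size * 2 - 1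
  · rw [if_pos h1, PySem.List.pyRepeat_singleton,
        tile1D _ bg columns (size * 2) (by rw [List.length_replicate]; omega) hn]
    apply List.map_congr_left
    intro c _
    have hj0 := PySem.Int.mod_nonneg c hn
    have hjN := PySem.Int.mod_lt c hn
    set j : Int := PySem.Int.mod c (size * 2) with hjdef
    rw [List.getD_eq_getElem?_getD,
        List.getElem?_replicate]
    simp only [show j.toNat < (size * 2).toNat by omega, if_true, Option.getD_some]
    rw [if_pos ((lit_alt_iff _ _ _).mpr (by omega))]
  · rw [if_neg h1]
    by_cases h2 : i = 1
    · rw [if_pos h2, PySem.List.pyRepeat_singleton,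
          tile1D _ bg columns (size * 2)
            (by simp only [List.length_append, List.length_replicate, List.length_cons,
                           List.length_nil]; omega) hn]
      apply List.map_congr_left
      intro c _
      have hj0 := PySem.Int.mod_nonneg c hn
      have hjN := PySem.Int.mod_lt c hn
      set j : Int := PySem.Int.mod c (size * 2) with hjdef
      rw [getD_gap color bg _ _ (by omega)]
      by_cases hjj : j = size * 2 - 1
      · rw [if_pos (by omega), if_pos ((lit_alt_iff _ _ _).mpr (by omega))]
      · rw [if_neg (by omega), if_neg (by rw [lit_alt_iff]; omega)]
    · rw [if_neg h2, PySem.List.pyRepeat_singleton,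
          tile1D _ bg columns (size * 2)
            (by simp only [List.length_append, List.length_replicate, List.length_cons,
                           List.length_nil]; omega) hn]
      apply List.map_congr_left
      intro c _
      have hj0 := PySem.Int.mod_nonneg c hn
      have hjN := PySem.Int.mod_lt c hn
      set j : Int := PySem.Int.mod c (size * 2) with hjdef
      rw [getD_sides color bg _ _ (by omega)]
      by_cases hjj : j = 0 ∨ j = size * 2 - 1
      · rw [if_pos (by omega), if_pos ((lit_alt_iff _ _ _).mpr (by omega))]
      · rw [if_neg (by omega), if_neg (by rw [lit_alt_iff]; omega)]

theorem A_nil (columns rows size color bg : Int) (hr : rows ≤ 0) :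
    greek_key columns rows size color bg = [] := by
  unfold greek_key
  rw [PySem.List.pyRange_one_eq_nil (a := 0) (b := rows) (by omega)]
  rfl

theorem alt_nil (columns rows size color bg : Int) (hneg : size ≤ -1) :
    greek_key_alt columns rows size color bg = [] := by
  unfold greek_key_alt
  dsimp only
  by_cases hv : PySem.Int.floordiv (rows + size * 2 - 1) (size * 2) ≤ 0
  · rw [if_pos hv]
  · rw [if_neg hv, PySem.List.pyRange_one_eq_nil (a := 0) (b := size * 2) (by omega),
        List.map_nil]
    have hrep : PySem.List.pyRepeat ([] : List (List Int))
        (PySem.Int.floordiv (rows + size * 2 - 1) (size * 2))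
        = (List.replicate (PySem.Int.floordiv (rows + size * 2 - 1) (size * 2)).toNat
            ([] : List (List Int))).flatten := rfl
    rw [hrep]
    rw [show (List.replicate (PySem.Int.floordiv (rows + size * 2 - 1) (size * 2)).toNat
            ([] : List (List Int))).flatten = [] from by
          simp [List.flatten_eq_nil_iff, List.eq_of_mem_replicate]]
    simp [PySem.List.slice]

-- ===== VERDICT (by name: the statement is the Claim_ definition above) =====
theorem greek_key_spec : Claim_equal_greek_key := by
  intro columns rows size color bg _ hpre
  unfold Spec_greek_key
  by_cases hs : 1 ≤ size
  · rw [A_eq_canon columns rows size color bg hs, alt_eq_canon columns rows size color bg hs]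
  · rcases hpre with hs1 | ⟨hsz, hr⟩
    · omega
    · rw [A_nil columns rows size color bg hr,
          alt_nil columns rows size color bg (by omega)]
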